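-- pv_equiv track=rewrite | github.com/MrBrantCode/unitest_baseline | mut_generate/mist_train_cf/cf_72106/solution.py | construct_sequence
-- ===== SOURCE A (Python) =====
-- def construct_sequence(n=12):
--     """
--     Generates a sequence of 'n' characters consisting only of 'x', 'y', and 'z'
--     with no repeating pairs.
--
--     Args:
--         n (int): The length of the sequence (default is 12).
--
--     Returns:
--         str: A sequence of 'n' characters.
--     """
--     next_char = {'x': 'y', 'y': 'z', 'z': 'x'}
--     sequence = []
--     current_char = 'x'
--
--     for _ in range(n):
--         sequence.append(current_char)
--         current_char = next_char[current_char]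
--
--     return "".join(sequence)
-- ===== SOURCE B (Python) =====
-- def construct_sequence(n=12):
--     """Repeat-and-slice: build an over-length "xyz" repetition and cut to n."""
--     return ("xyz" * (n // 3 + 1))[:n]
-- ===== Notes on version B (the rewrite author's own statement) =====
-- stated objective: simpler
-- what changed: Replaces the per-character transition-dict state machine and accumulator loop with a single closed-form repeat-and-slice expression ("xyz" * (n // 3 + 1))[:n].
import Mathlib
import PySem

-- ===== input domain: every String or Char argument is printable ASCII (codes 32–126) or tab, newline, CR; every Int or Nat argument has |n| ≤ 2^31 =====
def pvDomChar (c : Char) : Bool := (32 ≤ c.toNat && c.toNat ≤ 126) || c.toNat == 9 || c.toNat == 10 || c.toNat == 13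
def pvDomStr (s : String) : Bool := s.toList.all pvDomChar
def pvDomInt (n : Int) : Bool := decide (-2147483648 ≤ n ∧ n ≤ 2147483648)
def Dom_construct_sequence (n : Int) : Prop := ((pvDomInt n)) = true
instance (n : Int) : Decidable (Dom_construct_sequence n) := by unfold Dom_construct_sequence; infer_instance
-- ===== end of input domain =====

-- B replaces A's transition-dict state machine with one repeat-and-slice expression (simpler).


-- ===== PORT A =====
-- The for-loop over range(n) becomes a foldl over pyRange with state (sequence, current_char).
-- next_char[current_char] is getD with an unused default: the key is always present ('x','y','z').
def construct_sequence (n : Int) : String :=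
  let next_char : PySem.Dict Char Char := PySem.Dict.ofList [('x', 'y'), ('y', 'z'), ('z', 'x')]
  let r := (PySem.List.pyRange 0 n 1).foldl
    (fun (st : List Char × Char) _ => (st.1 ++ [st.2], PySem.Dict.getD next_char st.2 ' '))
    (([] : List Char), 'x')
  String.ofList r.1

-- ===== PORT B =====
-- ("xyz" * (n // 3 + 1))[:n], on the code-point list.
def construct_sequence_alt (n : Int) : String :=
  String.ofList (PySem.List.slice
    (PySem.List.pyRepeat ['x', 'y', 'z'] (PySem.Int.floordiv n 3 + 1)) none (some n))

-- ===== PRECONDITION & SPEC =====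
def Spec_construct_sequence (n : Int) (out : String) : Prop := out = construct_sequence_alt n
instance (n : Int) (out : String) : Decidable (Spec_construct_sequence n out) := by unfold Spec_construct_sequence; infer_instance

-- ===== CLAIM (what is proved, stated in full; the proofs are below) =====
def Claim_equal_construct_sequence : Prop := ∀ (n : Int), Dom_construct_sequence n → Spec_construct_sequence n (construct_sequence n)

-- ===== LEMMAS AND PROOFS =====

-- the dict of port A, and the pure sequence the loop builds
def csDict : PySem.Dict Char Char := PySem.Dict.ofList [('x', 'y'), ('y', 'z'), ('z', 'x')]

def csSeq : Nat → Char → List Char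
  | 0, _ => []
  | m + 1, c => c :: csSeq m (PySem.Dict.getD csDict c ' ')

theorem csFold (l : List Int) (acc : List Char) (c : Char) :
    (l.foldl (fun (st : List Char × Char) _ =>
        (st.1 ++ [st.2], PySem.Dict.getD csDict st.2 ' ')) (acc, c)).1
      = acc ++ csSeq l.length c := by
  induction l generalizing acc c with
  | nil => simp [csSeq]
  | cons x xs ih =>
    simp only [List.foldl_cons, List.length_cons, ih, csSeq, List.append_assoc,
      List.singleton_append]

theorem csSeq_take (k : Nat) : ∀ m : Nat, m ≤ 3 * k →
    csSeq m 'x' = List.take m (List.replicate k ['x', 'y', 'z']).flatten := by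
  induction k with
  | zero => intro m hm; interval_cases m; simp [csSeq]
  | succ k ih =>
    intro m hm
    have hx : PySem.Dict.getD csDict 'x' ' ' = 'y' := by decide
    have hy : PySem.Dict.getD csDict 'y' ' ' = 'z' := by decide
    have hz : PySem.Dict.getD csDict 'z' ' ' = 'x' := by decide
    rcases m with _ | _ | _ | m'
    · simp [csSeq]
    · rw [List.replicate_succ]
      show csSeq 1 'x' = _
      simp [csSeq]
    · rw [List.replicate_succ]
      show csSeq 2 'x' = _
      rw [show csSeq 2 'x' = ['x', 'y'] from by rw [csSeq, hx, csSeq]; rfl]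
      rfl
    · rw [show csSeq (m' + 1 + 1 + 1) 'x' = 'x' :: 'y' :: 'z' :: csSeq m' 'x' from by
          rw [csSeq, hx, csSeq, hy, csSeq, hz],
        ih m' (by omega), List.replicate_succ]
      rfl

theorem construct_sequence_spec : Claim_equal_construct_sequence := by
  intro n _
  unfold Spec_construct_sequence construct_sequence construct_sequence_alt
  simp only []
  rw [show (PySem.Dict.ofList [('x', 'y'), ('y', 'z'), ('z', 'x')]) = csDict from rfl]
  rw [csFold, PySem.List.length_pyRange_one]
  simp only [List.nil_append, Int.sub_zero]
  have hfd : PySem.Int.floordiv n 3 = n / 3 := by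
    simp [PySem.Int.floordiv, Int.fdiv_eq_ediv]
  by_cases hn : 0 < n
  · rw [PySem.List.slice_to _ (le_of_lt hn)]
    unfold PySem.List.pyRepeat
    rw [hfd, csSeq_take (n / 3 + 1).toNat n.toNat (by omega)]
  · by_cases hz : n = 0
    · subst hz
      rw [PySem.List.slice_to _ le_rfl]
      simp [csSeq]
    · -- n < 0 : the repeated list is already empty
      have hk : (PySem.Int.floordiv n 3 + 1).toNat = 0 := by rw [hfd]; omega
      unfold PySem.List.pyRepeat
      rw [hk]
      have h0 : n.toNat = 0 := by omega
      rw [h0]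
      simp [csSeq, PySem.List.slice]
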